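-- pv_equiv track=rewrite | github.com/Adejumok/Semicolon_Codewar | code_war.py | returns_odd
-- ===== SOURCE A (Python) =====
-- def returns_odd(arr):
--     temp_arr = arr[0]
--     odd = 0
--     even = 0
--     odd_num = None
--     even_num = None
--     for i in arr:
--         if i % 2 != 0:
--             odd += 1
--             odd_num = i
--         else:
--             even += 1
--             even_num = i
--     if odd == 1:
--         return odd_num
--     else:
--         return even_num
-- ===== SOURCE B (Python) =====
-- def returns_odd(arr):
--     # Stable sort by parity key: all odds (key False) first in original order,
--     # then all evens (key True) in original order.
--     s = sorted(arr, key=lambda x: x % 2 == 0)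
--     if s[0] % 2 != 0 and (len(s) == 1 or s[1] % 2 == 0):
--         return s[0]
--     return s[-1] if s[-1] % 2 == 0 else None
-- ===== Notes on version B (the rewrite author's own statement) =====
-- stated objective: alternative
-- what changed: Replaces A's fused single-pass loop with running counters and last-seen scalars by a stable sort on the parity key (odds first, evens last, each block in original order) followed by inspection of the ends of the sorted list.
-- outside the precondition, e.g. on returns_odd([3, 5]): A returns None, B returns None
import Mathlib
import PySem

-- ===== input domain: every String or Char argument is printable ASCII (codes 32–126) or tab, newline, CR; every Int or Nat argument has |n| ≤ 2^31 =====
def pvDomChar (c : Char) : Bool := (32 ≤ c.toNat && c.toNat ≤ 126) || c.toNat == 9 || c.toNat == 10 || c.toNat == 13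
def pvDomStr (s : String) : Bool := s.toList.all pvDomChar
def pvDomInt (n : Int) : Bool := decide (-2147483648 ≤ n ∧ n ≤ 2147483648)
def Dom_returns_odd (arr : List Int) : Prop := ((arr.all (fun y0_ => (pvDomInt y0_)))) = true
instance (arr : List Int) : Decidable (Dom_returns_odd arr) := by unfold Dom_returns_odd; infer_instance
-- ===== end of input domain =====

-- B replaces A's fused single-pass loop (running counters + last-seen scalars) by a stable
-- sort on the parity key (odds first, evens after, each block in original order) and then
-- inspects the ends of the sorted list (objective: alternative).

-- ===== PORT A =====
-- state: (odd count, even count, odd_num, even_num); arr[0] raise / None return excluded by Pre_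
def returns_odd (arr : List Int) : Int :=
  let s := arr.foldl
    (fun (st : Int × Int × Option Int × Option Int) i =>
      if PySem.Int.mod i 2 ≠ 0 then (st.1 + 1, st.2.1, some i, st.2.2.2)
      else (st.1, st.2.1 + 1, st.2.2.1, some i))
    (0, 0, none, none)
  if s.1 = 1 then (s.2.2.1).getD 0 else (s.2.2.2).getD 0

-- ===== PORT B =====
-- stable sort by the Bool parity key (False = odd sorts first), then look at s[0], s[1], s[-1]
def returns_odd_alt (arr : List Int) : Int :=
  let s := PySem.List.sorted arr (fun x => PySem.Int.mod x 2 == 0)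
  if PySem.Int.mod ((PySem.List.pyGet? s 0).getD 0) 2 ≠ 0 ∧
     ((s.length : Int) = 1 ∨ PySem.Int.mod ((PySem.List.pyGet? s 1).getD 0) 2 = 0)
  then (PySem.List.pyGet? s 0).getD 0
  else if PySem.Int.mod ((PySem.List.pyGet? s (-1)).getD 0) 2 = 0
       then (PySem.List.pyGet? s (-1)).getD 0
       else 0   -- Python returns None here; excluded by Pre_

-- ===== PRECONDITION & SPEC =====
-- Pre_ excludes the empty list (A raises IndexError on arr[0]) and lists with no even element
-- whose odd count is not 1 (A returns None, not an int).
def Pre_returns_odd (arr : List Int) : Prop :=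
  arr ≠ [] ∧ ((arr.filter (fun x => PySem.Int.mod x 2 ≠ 0)).length = 1 ∨
              arr.filter (fun x => PySem.Int.mod x 2 = 0) ≠ [])
instance (arr : List Int) : Decidable (Pre_returns_odd arr) := by unfold Pre_returns_odd; infer_instance
def pvWitness_returns_odd : List Int := [1, 2, 4]

def Spec_returns_odd (arr : List Int) (out : Int) : Prop := out = returns_odd_alt arr
instance (arr : List Int) (out : Int) : Decidable (Spec_returns_odd arr out) := by unfold Spec_returns_odd; infer_instance

-- ===== CLAIM (what is proved, stated in full; the proofs are below) =====
def Claim_equal_returns_odd : Prop := ∀ (arr : List Int), Dom_returns_odd arr → Pre_returns_odd arr → Spec_returns_odd arr (returns_odd arr)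

-- ===== LEMMAS AND PROOFS =====

-- characterisation of A's loop state: counts and last-seen = filtered lengths / getLast?
theorem pv_getLast?_cons_elim (x : Int) (l : List Int) (o : Option Int) :
    ((x :: l).getLast?).elim o some = (l.getLast?).elim (some x) some := by
  cases l with
  | nil => simp
  | cons y ys =>
    rw [List.getLast?_cons_cons]
    cases h : (y :: ys).getLast? with
    | none => exact absurd (List.getLast?_eq_none_iff.mp h) (by simp)
    | some v => simp

theorem returns_odd_fold_inv (p : Int → Prop) [DecidablePred p] (l : List Int) (a b : Int) (o e : Option Int) :
    l.foldl
      (fun (st : Int × Int × Option Int × Option Int) i =>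
        if p i then (st.1 + 1, st.2.1, some i, st.2.2.2)
        else (st.1, st.2.1 + 1, st.2.2.1, some i))
      (a, b, o, e)
    = (a + (l.filter (fun x => decide (p x))).length,
       b + (l.filter (fun x => !decide (p x))).length,
       ((l.filter (fun x => decide (p x))).getLast?).elim o some,
       ((l.filter (fun x => !decide (p x))).getLast?).elim e some) := by
  induction l generalizing a b o e with
  | nil => simp
  | cons x xs ih =>
    rw [List.foldl_cons, List.filter_cons, List.filter_cons]
    by_cases hx : p x
    · rw [if_pos hx, ih, decide_eq_true hx]
      refine Prod.ext ?_ (Prod.ext ?_ (Prod.ext ?_ ?_)) <;>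
        simp [pv_getLast?_cons_elim] <;> push_cast <;> ring
    · rw [if_neg hx, ih, decide_eq_false hx]
      refine Prod.ext ?_ (Prod.ext ?_ (Prod.ext ?_ ?_)) <;>
        simp [pv_getLast?_cons_elim] <;> push_cast <;> ring

-- the parity key used by B's sort
def pvPkey (x : Int) : Bool := PySem.Int.mod x 2 == 0

-- inserting an odd element into (odds ++ evens) puts it right after the odds
theorem pv_insert_odd (x : Int) (hx : pvPkey x = false) (odds evens : List Int)
    (hO : ∀ y ∈ odds, pvPkey y = false) (hE : ∀ y ∈ evens, pvPkey y = true) :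
    PySem.List.insertBy (fun a b => decide (pvPkey a < pvPkey b)) x (odds ++ evens)
      = odds ++ x :: evens := by
  induction odds with
  | nil =>
    cases evens with
    | nil => rfl
    | cons e es =>
      have he : pvPkey e = true := hE e (by simp)
      simp [PySem.List.insertBy, hx, he]
  | cons o os ih =>
    have ho : pvPkey o = false := hO o (by simp)
    have := ih (fun y hy => hO y (by simp [hy])) 
    simp only [List.cons_append, PySem.List.insertBy, hx, ho]
    rw [this]
    simp

-- inserting an even element goes to the very end
theorem pv_insert_even (x : Int) (hx : pvPkey x = true) (l : List Int) :
    PySem.List.insertBy (fun a b => decide (pvPkey a < pvPkey b)) x l = l ++ [x] := by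
  apply PySem.List.insertBy_of_forall_not_before
  intro y _
  simp [hx]

-- the foldl-insertBy form of B's sort keeps the invariant "odds so far ++ evens so far"
theorem pv_sort_parity_fold (arr : List Int) :
    ∀ odds evens : List Int, (∀ y ∈ odds, pvPkey y = false) → (∀ y ∈ evens, pvPkey y = true) →
    arr.foldl (fun acc x => PySem.List.insertBy (fun a b => decide (pvPkey a < pvPkey b)) x acc)
      (odds ++ evens)
    = (odds ++ arr.filter (fun x => !pvPkey x)) ++ (evens ++ arr.filter (fun x => pvPkey x)) := by
  induction arr with
  | nil => intro odds evens _ _; simp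
  | cons x xs ih =>
    intro odds evens hO hE
    rw [List.foldl_cons, List.filter_cons, List.filter_cons]
    cases hx : pvPkey x with
    | true =>
      rw [pv_insert_even x hx, List.append_assoc]
      rw [ih odds (evens ++ [x]) hO
        (fun y hy => by rcases List.mem_append.mp hy with h | h
                        · exact hE y h
                        · simp at h; subst h; exact hx)]
      simp [hx]
    | false =>
      rw [pv_insert_odd x hx odds evens hO hE,
          show odds ++ x :: evens = (odds ++ [x]) ++ evens by simp]
      rw [ih (odds ++ [x]) evens
        (fun y hy => by rcases List.mem_append.mp hy with h | h
                        · exact hO y h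
                        · simp at h; subst h; exact hx) hE]
      simp [hx]

-- B's sorted list is exactly: the odd elements in order, then the even elements in order
theorem pv_sorted_parity (arr : List Int) :
    PySem.List.sorted arr pvPkey
      = arr.filter (fun x => !pvPkey x) ++ arr.filter (fun x => pvPkey x) := by
  rw [PySem.List.sorted_eq_foldl_insertBy]
  have := pv_sort_parity_fold arr [] [] (by simp) (by simp)
  simpa using this

theorem pv_pyGet?_neg_one (l : List Int) (h : l ≠ []) :
    PySem.List.pyGet? l (-1) = l.getLast? := by
  have hl : 1 ≤ l.length := List.length_pos_iff.mpr h
  simp only [PySem.List.pyGet?, PySem.List.pyIdx?]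
  rw [if_neg (by omega), if_pos (by push_cast; omega)]
  simp only [Option.bind_some, Int.neg_neg, Int.toNat_one]
  rw [List.getLast?_eq_getElem?]

theorem pv_decide_ne (a : Int) : decide (a ≠ 0) = !(a == 0) := by
  by_cases h : a = 0 <;> simp [h]

theorem pv_filter_odd_eq (arr : List Int) :
    arr.filter (fun x => decide (PySem.Int.mod x 2 ≠ 0)) = arr.filter (fun x => !pvPkey x) := by
  apply List.filter_congr
  intro x _
  exact pv_decide_ne (PySem.Int.mod x 2)

theorem pv_filter_nodd_eq (arr : List Int) :
    arr.filter (fun x => !decide (PySem.Int.mod x 2 ≠ 0)) = arr.filter (fun x => pvPkey x) := by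
  apply List.filter_congr
  intro x _
  rw [pv_decide_ne (PySem.Int.mod x 2), Bool.not_not]
  rfl

theorem pv_filter_even_eq (arr : List Int) :
    arr.filter (fun x => decide (PySem.Int.mod x 2 = 0)) = arr.filter (fun x => pvPkey x) := by
  apply List.filter_congr
  intro x _
  by_cases h : PySem.Int.mod x 2 = 0
  · rw [decide_eq_true h, pvPkey, beq_iff_eq.mpr h]
  · rw [decide_eq_false h, pvPkey, Eq.symm (beq_eq_false_iff_ne.mpr h)]

theorem pv_elim_id (o : Option Int) : o.elim (none : Option Int) some = o := by
  cases o <;> rfl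

theorem pv_pyGet?_zero (x : Int) (l : List Int) : PySem.List.pyGet? (x :: l) 0 = some x := by
  simp [PySem.List.pyGet?, PySem.List.pyIdx?]

theorem pv_pyGet?_one (x y : Int) (l : List Int) : PySem.List.pyGet? (x :: y :: l) 1 = some y := by
  simp [PySem.List.pyGet?, PySem.List.pyIdx?]

-- ===== VERDICT (by name: the statement is the Claim_ definition above) =====
theorem returns_odd_spec : Claim_equal_returns_odd := by
  intro arr _ hpre
  unfold Spec_returns_odd
  simp only [returns_odd, returns_odd_alt]
  have hfold := returns_odd_fold_inv (fun i => PySem.Int.mod i 2 ≠ 0) arr 0 0 none none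
  rw [pv_filter_odd_eq, pv_filter_nodd_eq] at hfold
  simp only [pv_elim_id] at hfold
  rw [hfold, show (fun x : Int => PySem.Int.mod x 2 == 0) = pvPkey from rfl, pv_sorted_parity]
  obtain ⟨hne, hcase⟩ := hpre
  rw [pv_filter_odd_eq, pv_filter_even_eq] at hcase
  set odds := arr.filter (fun x => !pvPkey x) with hodds
  set evens := arr.filter (fun x => pvPkey x) with hevens
  have hOmem : ∀ y ∈ odds, pvPkey y = false := by
    intro y hy; have := List.of_mem_filter hy; simpa using this
  have hEmem : ∀ y ∈ evens, pvPkey y = true := by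
    intro y hy; have := List.of_mem_filter hy; simpa using this
  clear hfold hne
  match hsh : odds, hcase, hOmem with
  | [], hcase, hOmem =>
    -- no odd element: Pre_ gives a nonempty evens; both sides return the last even
    have hEne : evens ≠ [] := by
      rcases hcase with h | h
      · simp at h
      · exact h
    obtain ⟨e, es, hev⟩ := List.exists_cons_of_ne_nil hEne
    rw [hev] at hEmem ⊢
    have he0 : PySem.Int.mod e 2 = 0 := by
      have := hEmem e (by simp); simpa [pvPkey] using this
    have hlne : (e :: es : List Int) ≠ [] := by simp
    have hlast := List.getLast?_eq_getLast hlne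
    have hl0 : PySem.Int.mod ((e :: es).getLast hlne) 2 = 0 := by
      have := hEmem _ (List.getLast_mem hlne); simpa [pvPkey] using this
    rw [if_neg (by norm_num), List.nil_append, pv_pyGet?_zero,
        pv_pyGet?_neg_one _ hlne, hlast]
    rw [if_neg (by intro h; exact h.1 he0), if_pos (by simpa using hl0)]
  | [a], hcase, hOmem =>
    -- exactly one odd element: both sides return it
    have ha : PySem.Int.mod a 2 ≠ 0 := by
      have := hOmem a (by simp)
      intro h; rw [pvPkey, beq_iff_eq.mpr h] at this; exact Bool.true_eq_false.mp this
    rw [if_pos (by norm_num), List.cons_append, List.nil_append, pv_pyGet?_zero]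
    rw [if_pos ?_]
    · simp
    refine ⟨by simpa using ha, ?_⟩
    cases hev : evens with
    | nil => left; simp
    | cons e es =>
      right
      have he0 : PySem.Int.mod e 2 = 0 := by
        have := hEmem e (by rw [hev]; simp); simpa [pvPkey] using this
      rw [pv_pyGet?_one]
      simpa using he0
  | a :: b :: os, hcase, hOmem =>
    -- two or more odds: Pre_ gives a nonempty evens; both sides return the last even
    have hEne : evens ≠ [] := by
      rcases hcase with h | h
      · simp at h
      · exact h
    have hb : PySem.Int.mod b 2 ≠ 0 := by
      have := hOmem b (by simp)
      intro h; rw [pvPkey, beq_iff_eq.mpr h] at this; exact Bool.true_eq_false.mp this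
    rw [if_neg (by push_cast; simp; omega)]
    rw [List.cons_append, List.cons_append, pv_pyGet?_one]
    rw [if_neg (by
      rintro ⟨-, h2 | h2⟩
      · simp at h2; omega
      · exact hb (by simpa using h2))]
    have hgl : (a :: b :: (os ++ evens)).getLast? = evens.getLast? := by
      rw [← List.cons_append, ← List.cons_append]
      exact List.getLast?_append_of_ne_nil _ hEne
    have hlast := List.getLast?_eq_getLast hEne
    have hl0 : PySem.Int.mod (evens.getLast hEne) 2 = 0 := by
      have := hEmem _ (List.getLast_mem hEne); simpa [pvPkey] using this
    rw [pv_pyGet?_neg_one _ (by simp), hgl, hlast]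
    rw [if_pos (by simpa using hl0)]
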